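-- pv_equiv track=rewrite | github.com/VAZVAGer/pythonProject | OOP/2/2_1_10.py | __length_after_character
-- ===== SOURCE A (Python) =====
-- def __length_after_character(email):
--     counter = 0
--     for symbol in email[::-1]:
--         if symbol != "@":
--             counter += 1
--         else:
--             break
--     if counter <= 49:
--         return True
--     else:
--         return False
-- ===== SOURCE B (Python) =====
-- def __length_after_character(email):
--     return len(email) - email.rfind("@") - 1 <= 49
-- ===== Notes on version B (the rewrite author's own statement) =====
-- stated objective: simpler
-- what changed: Replaces the explicit reversed-scan loop with a counter and True/False branches by a single closed-form boolean: the number of characters after the last at-sign, obtained from str.rfind (whose absent-case sentinel makes that count the full length, matching A), compared against the limit.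
import Mathlib
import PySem

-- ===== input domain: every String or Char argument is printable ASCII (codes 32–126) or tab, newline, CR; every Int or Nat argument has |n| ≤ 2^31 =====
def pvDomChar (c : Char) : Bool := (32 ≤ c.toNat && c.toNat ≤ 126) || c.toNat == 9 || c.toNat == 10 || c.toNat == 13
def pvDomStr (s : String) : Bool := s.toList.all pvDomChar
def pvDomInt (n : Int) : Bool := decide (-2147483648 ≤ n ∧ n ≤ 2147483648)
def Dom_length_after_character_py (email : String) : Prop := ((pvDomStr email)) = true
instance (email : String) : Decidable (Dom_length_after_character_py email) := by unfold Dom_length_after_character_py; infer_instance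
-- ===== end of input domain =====

-- B replaces A's reversed-scan counting loop by the closed form len(email) - email.rfind('@') - 1 <= 49 (simpler).


-- ===== PORT A =====
-- the 'for symbol in email[::-1]: … break' loop, counter as the accumulator
def lacLoop (counter : Int) : List Char → Int
  | [] => counter
  | c :: rest => if c ≠ '@' then lacLoop (counter + 1) rest else counter

def length_after_character_py (email : String) : Bool :=
  let rev := (PySem.Str.slice? email none none (-1)).getD ""   -- email[::-1]; step ≠ 0, always some
  let counter := lacLoop 0 rev.toList
  if counter ≤ 49 then true else false

-- ===== PORT B =====
def length_after_character_py_alt (email : String) : Bool :=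
  decide (PySem.Str.len email - PySem.Str.rfind email "@" - 1 ≤ 49)

-- ===== PRECONDITION & SPEC =====
def Spec_length_after_character_py (email : String) (out : Bool) : Prop := out = length_after_character_py_alt email
instance (email : String) (out : Bool) : Decidable (Spec_length_after_character_py email out) := by unfold Spec_length_after_character_py; infer_instance

-- ===== CLAIM (what is proved, stated in full; the proofs are below) =====
def Claim_equal_length_after_character_py : Prop := ∀ (email : String), Dom_length_after_character_py email → Spec_length_after_character_py email (length_after_character_py email)

-- ===== LEMMAS AND PROOFS =====

-- single-char needle: isPrefixOf reads the head
theorem isPrefixOf_singleton (c : Char) (l : List Char) :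
    [c].isPrefixOf l = (l.head? == some c) := by
  cases l with
  | nil => rfl
  | cons x xs => simp [List.isPrefixOf, BEq.comm]

theorem head?_drop (l : List Char) (j : Nat) : (l.drop j).head? = l[j]? := by
  simp [List.head?_eq_getElem?]

-- one-step unfoldings of rfind's scan
theorem rfind_go_succ (s sub : List Char) (j : Nat) :
    PySem.Chars.rfind.go s sub (j + 1)
      = if sub.isPrefixOf (s.drop (j + 1)) then ((j : Int) + 1)
        else PySem.Chars.rfind.go s sub j := rfl

theorem rfind_go_zero (s sub : List Char) :
    PySem.Chars.rfind.go s sub 0 = if sub.isPrefixOf s then (0 : Int) else -1 := rfl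

theorem rfind_go_eval (s sub : List Char) (j : Nat)
    (h : sub.isPrefixOf (s.drop j) = true) :
    PySem.Chars.rfind.go s sub j = (j : Int) := by
  cases j with
  | zero => rw [rfind_go_zero, if_pos (by simpa using h)]; rfl
  | succ j => rw [rfind_go_succ, if_pos h]; push_cast; ring

-- accumulator lemma for A's loop
theorem lacLoop_acc (k : Int) (l : List Char) : lacLoop k l = k + lacLoop 0 l := by
  induction l generalizing k with
  | nil => simp [lacLoop]
  | cons c rest ih =>
    by_cases h : c = '@'
    · simp [lacLoop, h]
    · simp only [lacLoop, ne_eq, h, not_false_eq_true, if_true]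
      rw [ih (0 + 1), ih (k + 1)]
      ring

-- appending a non-'@' char does not change go below the old length
theorem rfind_go_append (ds : List Char) (c : Char) (hc : c ≠ '@') :
    ∀ j, j ≤ ds.length →
      PySem.Chars.rfind.go (ds ++ [c]) ['@'] j = PySem.Chars.rfind.go ds ['@'] j := by
  intro j
  induction j with
  | zero =>
    intro _
    rw [rfind_go_zero, rfind_go_zero, isPrefixOf_singleton, isPrefixOf_singleton]
    cases ds with
    | nil => simp [hc]
    | cons d t => simp
  | succ j ih =>
    intro hj
    rw [rfind_go_succ, rfind_go_succ, isPrefixOf_singleton, isPrefixOf_singleton,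
        head?_drop, head?_drop]
    by_cases h : j + 1 = ds.length
    · have h1 : (ds ++ [c])[j+1]? = some c := by
        rw [List.getElem?_append_right (by omega)]
        simp [h]
      have h2 : ds[j+1]? = none := by
        rw [List.getElem?_eq_none]; omega
      rw [h1, h2, if_neg (by simpa using hc), if_neg (by simp)]
      exact ih (by omega)
    · have h1 : (ds ++ [c])[j+1]? = ds[j+1]? :=
        List.getElem?_append_left (by omega)
      rw [h1]
      by_cases hh : (ds[j+1]? == some '@') = true
      · rw [if_pos hh, if_pos hh]
      · rw [if_neg hh, if_neg hh]
        exact ih (by omega)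

-- main characterisation: A's counter = len - 1 - rfind
theorem lacLoop_eq (cs : List Char) :
    lacLoop 0 cs.reverse = (cs.length : Int) - 1 - PySem.Chars.rfind cs ['@'] := by
  induction cs using List.reverseRecOn with
  | nil => decide
  | append_singleton ds c ih =>
    rw [List.reverse_append, List.reverse_singleton]
    show lacLoop 0 (c :: ds.reverse) = _
    by_cases hc : c = '@'
    · subst hc
      have hr : PySem.Chars.rfind (ds ++ ['@']) ['@'] = (ds.length : Int) := by
        show PySem.Chars.rfind.go (ds ++ ['@']) ['@'] (ds ++ ['@']).length = _
        rw [List.length_append, List.length_singleton, rfind_go_succ,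
            if_neg (by rw [isPrefixOf_singleton, head?_drop,
                           List.getElem?_eq_none (by simp)]; simp)]
        exact rfind_go_eval _ _ _
          (by rw [isPrefixOf_singleton, head?_drop,
                  List.getElem?_append_right (le_refl _)]; simp)
      rw [hr]
      simp [lacLoop, List.length_append]
    · have hr : PySem.Chars.rfind (ds ++ [c]) ['@'] = PySem.Chars.rfind ds ['@'] := by
        show PySem.Chars.rfind.go (ds ++ [c]) ['@'] (ds ++ [c]).length
           = PySem.Chars.rfind.go ds ['@'] ds.length
        rw [List.length_append, List.length_singleton, rfind_go_succ,
            if_neg (by rw [isPrefixOf_singleton, head?_drop,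
                           List.getElem?_eq_none (by simp)]; simp)]
        exact rfind_go_append ds c hc ds.length (le_refl _)
      rw [hr]
      simp only [lacLoop, ne_eq, hc, not_false_eq_true, if_true]
      rw [lacLoop_acc, ih]
      push_cast [List.length_append, List.length_singleton]
      ring

-- ===== VERDICT (by name: the statement is the Claim_ definition above) =====
theorem length_after_character_py_spec : Claim_equal_length_after_character_py := by
  intro email _
  show length_after_character_py email = length_after_character_py_alt email
  unfold length_after_character_py length_after_character_py_alt
  rw [PySem.Str.slice?_none_none_neg_one]
  simp only [Option.getD_some]
  simp only [show (String.ofList email.toList.reverse).toList = email.toList.reverse from by simp]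
  rw [lacLoop_eq, PySem.Str.len_eq, PySem.Str.rfind_eq]
  rw [show ("@" : String).toList = ['@'] from rfl]
  have hb : (email.toList.length : Int) = (email.length : Int) := by simp
  by_cases h : (email.toList.length : Int) - 1 - PySem.Chars.rfind email.toList ['@'] ≤ 49
  · rw [if_pos h]
    symm
    rw [decide_eq_true_eq]
    omega
  · rw [if_neg h]
    symm
    rw [decide_eq_false_iff_not]
    omega
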